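-- pv_equiv track=rewrite | github.com/distyoh/myphychallenges | capital.py | cap_func
-- ===== SOURCE A (Python) =====
-- def cap_func(inputter):
--     inputdata = inputter
--     newword = ''
--     out = ''
--     for eachwords in inputdata:
--         if eachwords.isalpha():
--             newword += eachwords
--         else:
--             newword += ' '
--
--     newdata = newword.split()
--     for words in newdata:
--         out += words.title()
--
--     return out
-- ===== SOURCE B (Python) =====
-- def cap_func(inputter):
--     pieces = []
--     at_word_start = True
--     for element in inputter:
--         if element.isalpha():
--             pieces.append(element.upper() if at_word_start else element.lower())
--             at_word_start = False
--         else: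
--             at_word_start = True
--     return ''.join(pieces)
-- ===== Notes on version B (the rewrite author's own statement) =====
-- stated objective: simpler
-- what changed: Replaced A's two-phase approach (build a space-blanked copy of the whole string, then split it into words and title-case each) by a single pass over the input with an at_word_start flag that uppercases a letter at a word start and lowercases it otherwise, emitting non-letters never.
import Mathlib
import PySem

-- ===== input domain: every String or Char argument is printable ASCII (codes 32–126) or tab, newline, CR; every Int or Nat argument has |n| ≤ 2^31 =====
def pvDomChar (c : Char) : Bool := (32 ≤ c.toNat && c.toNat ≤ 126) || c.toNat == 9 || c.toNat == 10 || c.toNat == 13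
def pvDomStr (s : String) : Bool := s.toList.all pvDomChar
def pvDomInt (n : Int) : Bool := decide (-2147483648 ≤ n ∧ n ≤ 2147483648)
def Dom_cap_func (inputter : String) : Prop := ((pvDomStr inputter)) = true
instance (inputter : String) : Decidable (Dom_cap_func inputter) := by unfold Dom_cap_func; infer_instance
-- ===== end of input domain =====

-- B replaces A's space-filled intermediate string + split/title second loop by one state-tracked pass (objective: simpler).


-- ===== PORT A =====
-- hand port of Python str.title, exact on the ASCII domain (there a char is cased iff it is a letter):
-- each letter is uppercased after a non-cased position and lowercased after a cased one
def titleGo : List Char → Bool → List Char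
  | [], _ => []
  | c :: cs, prevCased =>
    (if PySem.Chars.isalpha c then
       (if prevCased then PySem.Chars.lowerChar c else PySem.Chars.upperChar c)
     else c) :: titleGo cs (PySem.Chars.isalpha c)

def titleW (w : List Char) : List Char := titleGo w false

def cap_func (inputter : String) : String :=
  let inputdata := inputter.toList
  let newword := inputdata.foldl
    (fun nw c => nw ++ [if PySem.Chars.isalpha c then c else ' ']) []
  let newdata := PySem.Chars.split₀ newword
  let out := newdata.foldl (fun out w => out ++ titleW w) []
  String.mk out

-- ===== PORT B =====
-- the pieces list of Source B: one single-character piece per letter, state at_word_start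
def altGo : List Char → Bool → List (List Char)
  | [], _ => []
  | c :: cs, atStart =>
    if PySem.Chars.isalpha c then
      [if atStart then PySem.Chars.upperChar c else PySem.Chars.lowerChar c] :: altGo cs false
    else altGo cs true

def cap_func_alt (inputter : String) : String :=
  String.mk (PySem.Chars.join [] (altGo inputter.toList true))

-- ===== PRECONDITION & SPEC =====
def Spec_cap_func (inputter : String) (out : String) : Prop := out = cap_func_alt inputter
instance (inputter : String) (out : String) : Decidable (Spec_cap_func inputter out) := by unfold Spec_cap_func; infer_instance

-- ===== CLAIM (what is proved, stated in full; the proofs are below) =====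
def Claim_equal_cap_func : Prop := ∀ (inputter : String), Dom_cap_func inputter → Spec_cap_func inputter (cap_func inputter)

-- ===== LEMMAS AND PROOFS =====

-- structural restatement of PySem.Chars.split₀.go without the word/result accumulators
def wsplit : List Char → List Char → List (List Char)
  | [], cur => if cur.isEmpty then [] else [cur.reverse]
  | c :: rest, cur =>
    if PySem.Chars.isspace c then
      if cur.isEmpty then wsplit rest [] else wsplit rest [] |>.cons cur.reverse
    else wsplit rest (c :: cur)

theorem split₀_go_eq_wsplit (s : List Char) : ∀ (cur : List Char) (acc : List (List Char)),
    PySem.Chars.split₀.go s cur acc = acc.reverse ++ wsplit s cur := by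
  induction s with
  | nil =>
    intro cur acc
    simp [PySem.Chars.split₀.go, wsplit]
    split_ifs <;> simp
  | cons c rest ih =>
    intro cur acc
    simp only [PySem.Chars.split₀.go, wsplit]
    split_ifs <;> simp [ih]

theorem split₀_eq_wsplit (s : List Char) : PySem.Chars.split₀ s = wsplit s [] := by
  simpa using split₀_go_eq_wsplit s [] []

theorem isalpha_not_isspace {c : Char} (h : PySem.Chars.isalpha c = true) :
    PySem.Chars.isspace c = false := by
  simp only [PySem.Chars.isalpha, PySem.Chars.isupper, PySem.Chars.islower,
    Bool.or_eq_true, Bool.and_eq_true, decide_eq_true_eq] at h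
  have h1 : 65 ≤ c.toNat ∧ c.toNat ≤ 90 ∨ 97 ≤ c.toNat ∧ c.toNat ≤ 122 := by
    rcases h with ⟨ha, hb⟩ | ⟨ha, hb⟩
    · exact Or.inl ⟨ha, hb⟩
    · exact Or.inr ⟨ha, hb⟩
  cases hs : PySem.Chars.isspace c with
  | false => rfl
  | true =>
    exfalso
    simp only [PySem.Chars.isspace, Bool.or_eq_true, Bool.and_eq_true, decide_eq_true_eq] at hs
    omega

-- str.title over an append whose first part is a nonempty all-letter run
theorem titleGo_append (w : List Char) : ∀ (t : List Char) (b : Bool), w ≠ [] →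
    (∀ c ∈ w, PySem.Chars.isalpha c = true) →
    titleGo (w ++ t) b = titleGo w b ++ titleGo t true := by
  induction w with
  | nil => intro t b h _; exact absurd rfl h
  | cons c cs ih =>
    intro t b _ hall
    have hc : PySem.Chars.isalpha c = true := hall c (List.mem_cons_self ..)
    by_cases hcs : cs = []
    · subst hcs; simp [titleGo, hc]
    · have := ih t (PySem.Chars.isalpha c) hcs (fun x hx => hall x (List.mem_cons_of_mem _ hx))
      rw [hc] at this
      simp [titleGo, hc, this]

-- the map A applies to every input character
def blank (c : Char) : Char := if PySem.Chars.isalpha c then c else ' '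

-- the core correspondence: split/title of the blanked tail, given the letters of the
-- unfinished word (reversed) in cur, equals B's single pass in the matching state
theorem main_inv (l : List Char) : ∀ (cur : List Char),
    (∀ c ∈ cur, PySem.Chars.isalpha c = true) →
    ((wsplit (l.map blank) cur).map titleW).flatten =
      (if cur.isEmpty then (altGo l true).flatten
       else titleW cur.reverse ++ (altGo l false).flatten) := by
  induction l with
  | nil =>
    intro cur _
    cases cur <;> simp [wsplit, titleW, altGo]
  | cons c cs ih =>
    intro cur hall
    by_cases hc : PySem.Chars.isalpha c = true
    · have hns : PySem.Chars.isspace c = false := isalpha_not_isspace hc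
      have hcur' : ∀ x ∈ c :: cur, PySem.Chars.isalpha x = true := by
        intro x hx
        rcases List.mem_cons.mp hx with h | h
        · subst h; exact hc
        · exact hall x h
      have := ih (c :: cur) hcur'
      cases cur with
      | nil =>
        simp [blank, hc, wsplit, hns, this, titleW, titleGo, altGo]
      | cons d ds =>
        have htg : titleGo ((d :: ds).reverse ++ [c]) false
            = titleGo (d :: ds).reverse false ++ titleGo [c] true := by
          apply titleGo_append
          · simp
          · intro x hx
            exact hall x (by simpa using List.mem_reverse.mp hx)
        simp only [List.isEmpty_cons, Bool.false_eq_true, if_false] at this ⊢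
        have hstep : ((wsplit ((c :: cs).map blank) (d :: ds)).map titleW).flatten
            = titleW (c :: d :: ds).reverse ++ (altGo cs false).flatten := by
          simp only [List.map_cons, blank, hc, if_true, wsplit, hns, Bool.false_eq_true,
            if_false]
          exact this
        rw [hstep]
        simp only [titleW, List.reverse_cons, List.append_assoc] at htg ⊢
        rw [htg]
        simp [titleGo, hc, altGo]
    · have hsp : PySem.Chars.isspace ' ' = true := by decide
      cases cur with
      | nil =>
        have := ih [] (by simp)
        simp [blank, hc, wsplit, hsp, this, altGo]
      | cons d ds =>
        have := ih [] (by simp)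
        simp [blank, hc, wsplit, hsp, this, altGo, titleW]

theorem join_nil_flatten (ps : List (List Char)) : PySem.Chars.join [] ps = ps.flatten := by
  induction ps with
  | nil => rfl
  | cons p ps ih =>
    cases ps with
    | nil => simp [PySem.Chars.join, List.intercalate]
    | cons q qs =>
      simp only [PySem.Chars.join, List.intercalate] at *
      simp [List.intersperse, ih]

-- ===== VERDICT (by name: the statement is the Claim_ definition above) =====
theorem cap_func_spec : Claim_equal_cap_func := by
  intro inputter _
  unfold Spec_cap_func cap_func cap_func_alt
  simp only [PySem.List.foldl_append_singleton_eq_map, List.nil_append,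
    PySem.List.foldl_append_eq_flatMap, split₀_eq_wsplit, join_nil_flatten]
  have := main_inv inputter.toList [] (by simp)
  simp only [List.isEmpty_nil, if_pos] at this
  rw [List.flatMap_def, show (fun c => if PySem.Chars.isalpha c then c else ' ') = blank from rfl, this]
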